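-- pv_equiv track=rewrite | github.com/Likitha-Gedipudi/LinkedIn_Match_Algorithm | 2_feature_engineering.py | _alumni_score
-- ===== SOURCE A (Python) =====
-- def _alumni_score(user, target):
--     """Same university? Alumni connections are valuable!"""
--     # Try to extract education/university info
--     user_edu = user.get('education_list', [])
--     target_edu = target.get('education_list', [])
--
--     # Extract school names
--     user_schools = set()
--     target_schools = set()
--
--     if isinstance(user_edu, list):
--         for edu in user_edu:
--             if isinstance(edu, dict) and 'school' in edu:
--                 user_schools.add(edu['school'].lower().strip())
--
--     if isinstance(target_edu, list):
--         for edu in target_edu: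
--             if isinstance(edu, dict) and 'school' in edu:
--                 target_schools.add(edu['school'].lower().strip())
--
--     # Check for matching schools
--     if user_schools and target_schools:
--         # Exact match
--         common = user_schools & target_schools
--         if common:
--             return 100  # Same university!
--
--         # Partial match (e.g., "MIT" in "MIT Sloan")
--         for u_school in user_schools:
--             for t_school in target_schools:
--                 if u_school in t_school or t_school in u_school:
--                     return 80
--
--     return 0  # No alumni connection
-- ===== SOURCE B (Python) =====
-- def _alumni_score(user, target):
--     """Same university? Alumni connections are valuable!"""
--     def names(profile):
--         edu = profile.get('education_list', [])
--         if not isinstance(edu, list):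
--             return []
--         return [e['school'].lower().strip()
--                 for e in edu if isinstance(e, dict) and 'school' in e]
--
--     def pair_score(u, t):
--         if u == t:
--             return 100          # same university
--         if u in t or t in u:
--             return 80           # partial name match
--         return 0
--
--     user_names = names(user)
--     target_names = names(target)
--     if not user_names or not target_names:
--         return 0
--
--     # No sets, no phases: score every pair and keep the running maximum.
--     best = 0
--     for u in user_names:
--         for t in target_names:
--             best = max(best, pair_score(u, t))
--     return best
-- ===== Notes on version B (the rewrite author's own statement) =====
-- stated objective: alternative
-- what changed: Drops A's set machinery and phased classification (build two sets, intersect for an exact match, then a separate early-return substring loop) in favour of a per-pair scoring function (100/80/0) applied to the raw undeduplicated normalized name lists with a running maximum; correctness relies on the result being a maximum over pairs, so deduplication and scan order are irrelevant.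
import Mathlib
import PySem

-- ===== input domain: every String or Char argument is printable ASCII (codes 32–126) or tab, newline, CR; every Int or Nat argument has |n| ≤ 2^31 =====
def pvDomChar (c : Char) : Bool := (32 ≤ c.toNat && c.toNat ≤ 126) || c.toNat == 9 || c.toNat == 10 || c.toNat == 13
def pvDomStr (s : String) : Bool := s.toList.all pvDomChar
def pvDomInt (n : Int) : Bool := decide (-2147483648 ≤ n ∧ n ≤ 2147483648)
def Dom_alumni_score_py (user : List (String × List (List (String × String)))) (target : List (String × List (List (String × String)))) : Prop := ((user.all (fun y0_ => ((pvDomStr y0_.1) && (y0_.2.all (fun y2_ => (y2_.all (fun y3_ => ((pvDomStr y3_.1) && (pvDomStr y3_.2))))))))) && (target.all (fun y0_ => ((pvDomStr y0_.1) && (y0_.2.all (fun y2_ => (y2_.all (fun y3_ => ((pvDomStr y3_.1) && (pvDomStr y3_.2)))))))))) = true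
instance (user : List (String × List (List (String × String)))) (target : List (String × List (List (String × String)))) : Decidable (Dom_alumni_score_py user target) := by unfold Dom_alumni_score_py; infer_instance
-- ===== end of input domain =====

-- B drops A's sets and phased classification (intersect for exact, then an early-return
-- substring loop): it scores each pair of raw normalised names 100/80/0 and returns the
-- running maximum over all pairs (objective: alternative).
-- In the typed domain every value already is a list of dicts, so A's isinstance guards
-- are always true and are not ported.

-- ===== PORT A =====
-- A's two 'for edu in …' accumulation loops into a set
def pvSchoolsA (edu_list : List (List (String × String))) : PySem.Set String :=
  edu_list.foldl (fun s edu =>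
    match (PySem.Dict.mk edu).get? "school" with   -- 'school' in edu, then edu['school']
    | some v => PySem.Set.add s (PySem.Str.strip (PySem.Str.lower v))
    | none => s) PySem.Set.empty

def alumni_score_py (user : List (String × List (List (String × String)))) (target : List (String × List (List (String × String)))) : Int :=
  let user_schools := pvSchoolsA ((PySem.Dict.mk user).getD "education_list" [])
  let target_schools := pvSchoolsA ((PySem.Dict.mk target).getD "education_list" [])
  if user_schools ≠ [] ∧ target_schools ≠ [] then
    let common := PySem.Set.inter user_schools target_schools
    if common ≠ [] then (100 : Int)
    else if user_schools.any (fun u => target_schools.any (fun t =>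
        PySem.Str.isIn u t || PySem.Str.isIn t u)) then (80 : Int)   -- early-return loop: constant result, order-independent
    else 0
  else 0

-- ===== PORT B =====
-- B's comprehension: the raw (undeduplicated) normalised name list
def pvNames (edu_list : List (List (String × String))) : List String :=
  edu_list.filterMap (fun edu =>
    ((PySem.Dict.mk edu).get? "school").map (fun v => PySem.Str.strip (PySem.Str.lower v)))

-- B's per-pair scoring function
def pvPairScore (u t : String) : Int :=
  if u == t then 100 else if PySem.Str.isIn u t || PySem.Str.isIn t u then 80 else 0

def alumni_score_py_alt (user : List (String × List (List (String × String)))) (target : List (String × List (List (String × String)))) : Int :=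
  let user_names := pvNames ((PySem.Dict.mk user).getD "education_list" [])
  let target_names := pvNames ((PySem.Dict.mk target).getD "education_list" [])
  if user_names = [] ∨ target_names = [] then 0
  else user_names.foldl (fun best u =>
         target_names.foldl (fun best t => max best (pvPairScore u t)) best) 0

-- ===== PRECONDITION & SPEC =====
def Spec_alumni_score_py (user : List (String × List (List (String × String)))) (target : List (String × List (List (String × String)))) (out : Int) : Prop := out = alumni_score_py_alt user target
instance (user : List (String × List (List (String × String)))) (target : List (String × List (List (String × String)))) (out : Int) : Decidable (Spec_alumni_score_py user target out) := by unfold Spec_alumni_score_py; infer_instance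

-- ===== CLAIM (what is proved, stated in full; the proofs are below) =====
def Claim_equal_alumni_score_py : Prop := ∀ (user : List (String × List (List (String × String)))) (target : List (String × List (List (String × String)))), Dom_alumni_score_py user target → Spec_alumni_score_py user target (alumni_score_py user target)

-- ===== LEMMAS AND PROOFS =====

-- A's fold-into-a-set is set(pvNames l)
theorem pvSchools_aux (l : List (List (String × String))) (s : PySem.Set String) :
    l.foldl (fun s edu =>
      match (PySem.Dict.mk edu).get? "school" with
      | some v => PySem.Set.add s (PySem.Str.strip (PySem.Str.lower v))
      | none => s) s
    = (pvNames l).foldl PySem.Set.add s := by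
  induction l generalizing s with
  | nil => rfl
  | cons e es ih =>
    simp only [List.foldl_cons, pvNames, List.filterMap_cons]
    cases h : (PySem.Dict.mk e).get? "school" with
    | none => simpa [pvNames] using ih _
    | some v => simpa [pvNames] using ih _

theorem pvSchoolsA_eq (l : List (List (String × String))) :
    pvSchoolsA l = PySem.Set.ofList (pvNames l) := by
  rw [PySem.Set.ofList_eq_foldl]; exact pvSchools_aux l _

-- set(l) is empty iff l is
theorem ofList_eq_nil_iff (l : List String) : PySem.Set.ofList l = [] ↔ l = [] := by
  constructor
  · intro h
    cases l with
    | nil => rfl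
    | cons x xs =>
      have : x ∈ PySem.Set.ofList (x :: xs) := (PySem.Set.mem_ofList _ _).mpr (List.mem_cons_self ..)
      rw [h] at this; exact absurd this (List.not_mem_nil)
  · rintro rfl; rfl

-- pvPairScore only takes the three values
theorem pvPairScore_val (u t : String) : pvPairScore u t = 0 ∨ pvPairScore u t = 80 ∨ pvPairScore u t = 100 := by
  unfold pvPairScore; split_ifs <;> simp

theorem pvPairScore_eq_100 (u t : String) : pvPairScore u t = 100 ↔ u = t := by
  unfold pvPairScore; split_ifs with h1 h2 <;> simp_all

theorem pvPairScore_eq_80 (u t : String) :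
    pvPairScore u t = 80 ↔ (u ≠ t ∧ (PySem.Str.isIn u t || PySem.Str.isIn t u) = true) := by
  unfold pvPairScore; split_ifs with h1 h2 <;> simp_all

-- the nested max fold is the max fold over the flattened pair-score list
theorem nested_fold_flatMap (us ts : List String) (b : Int) :
    us.foldl (fun best u => ts.foldl (fun best t => max best (pvPairScore u t)) best) b
    = (us.flatMap (fun u => ts.map (pvPairScore u))).foldl max b := by
  induction us generalizing b with
  | nil => rfl
  | cons u us ih =>
    simp only [List.foldl_cons, List.flatMap_cons, List.foldl_append, List.foldl_map]
    exact ih _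

-- a max fold over a {0,80,100}-valued list, classified
theorem maxfold (L : List Int) : (∀ x ∈ L, x = 0 ∨ x = 80 ∨ x = 100) →
    ∀ b : Int, b = 0 ∨ b = 80 ∨ b = 100 →
    L.foldl max b
      = if b = 100 ∨ L.any (fun x => x == 100) then 100
        else if b = 80 ∨ L.any (fun x => x == 80) then 80 else 0 := by
  induction L with
  | nil =>
    intro _ b hb
    rcases hb with rfl | rfl | rfl <;> simp
  | cons x L ih =>
    intro h b hb
    have hx := h x (List.mem_cons_self ..)
    have hrest : ∀ y ∈ L, y = 0 ∨ y = 80 ∨ y = 100 := fun y hy => h y (List.mem_cons_of_mem _ hy)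
    simp only [List.foldl_cons, List.any_cons]
    rcases hb with rfl | rfl | rfl <;> rcases hx with rfl | rfl | rfl <;>
      rw [ih hrest _ (by norm_num)] <;> norm_num

-- ===== VERDICT (by name: the statement is the Claim_ definition above) =====
theorem alumni_score_py_spec : Claim_equal_alumni_score_py := by
  intro user target _
  unfold Spec_alumni_score_py alumni_score_py alumni_score_py_alt
  dsimp only
  rw [pvSchoolsA_eq, pvSchoolsA_eq]
  set Lu := pvNames ((PySem.Dict.mk user).getD "education_list" []) with hLu
  set Lt := pvNames ((PySem.Dict.mk target).getD "education_list" []) with hLt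
  by_cases hg : Lu = [] ∨ Lt = []
  · rcases hg with h | h <;>
      simp [h, ofList_eq_nil_iff]
  · rw [not_or] at hg
    rw [if_pos ⟨fun h => hg.1 ((ofList_eq_nil_iff _).mp h), fun h => hg.2 ((ofList_eq_nil_iff _).mp h)⟩]
    conv_rhs => rw [if_neg (show ¬(Lu = [] ∨ Lt = []) from fun h => h.elim hg.1 hg.2)]
    conv_rhs =>
      rw [nested_fold_flatMap,
        maxfold _ (by
          intro x hx
          rcases List.mem_flatMap.mp hx with ⟨u, _, hm⟩
          rcases List.mem_map.mp hm with ⟨t, _, rfl⟩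
          exact pvPairScore_val u t) 0 (Or.inl rfl)]
    have hE : ((Lu.flatMap (fun u => Lt.map (pvPairScore u))).any (fun x => x == 100) = true)
        ↔ (∃ u ∈ Lu, ∃ t ∈ Lt, u = t) := by
      simp only [List.any_eq_true, List.mem_flatMap, List.mem_map, beq_iff_eq]
      constructor
      · rintro ⟨x, ⟨u, hu, t, ht, rfl⟩, hx⟩
        exact ⟨u, hu, t, ht, (pvPairScore_eq_100 u t).mp hx⟩
      · rintro ⟨u, hu, t, ht, rfl⟩
        exact ⟨100, ⟨u, hu, u, ht, (pvPairScore_eq_100 u u).mpr rfl⟩, rfl⟩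
    have h80 : ((Lu.flatMap (fun u => Lt.map (pvPairScore u))).any (fun x => x == 80) = true)
        ↔ (∃ u ∈ Lu, ∃ t ∈ Lt, pvPairScore u t = 80) := by
      simp only [List.any_eq_true, List.mem_flatMap, List.mem_map, beq_iff_eq]
      constructor
      · rintro ⟨x, ⟨u, hu, t, ht, rfl⟩, hx⟩
        exact ⟨u, hu, t, ht, hx⟩
      · rintro ⟨u, hu, t, ht, hx⟩
        exact ⟨80, ⟨u, hu, t, ht, hx⟩, rfl⟩
    have hInter : (PySem.Set.inter (PySem.Set.ofList Lu) (PySem.Set.ofList Lt) ≠ [])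
        ↔ (∃ u ∈ Lu, ∃ t ∈ Lt, u = t) := by
      constructor
      · intro h
        rcases List.exists_mem_of_ne_nil _ h with ⟨x, hx⟩
        rw [PySem.Set.mem_inter] at hx
        exact ⟨x, (PySem.Set.mem_ofList _ _).mp hx.1, x, (PySem.Set.mem_ofList _ _).mp hx.2, rfl⟩
      · rintro ⟨u, hu, t, ht, rfl⟩ h
        have : u ∈ PySem.Set.inter (PySem.Set.ofList Lu) (PySem.Set.ofList Lt) :=
          (PySem.Set.mem_inter ..).mpr ⟨(PySem.Set.mem_ofList _ _).mpr hu, (PySem.Set.mem_ofList _ _).mpr ht⟩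
        rw [h] at this; exact absurd this (List.not_mem_nil)
    have hP : ((PySem.Set.ofList Lu).any (fun u => (PySem.Set.ofList Lt).any (fun t =>
          PySem.Str.isIn u t || PySem.Str.isIn t u)) = true)
        ↔ (∃ u ∈ Lu, ∃ t ∈ Lt, (PySem.Str.isIn u t || PySem.Str.isIn t u) = true) := by
      simp [List.any_eq_true, PySem.Set.mem_ofList]
    by_cases hEx : ∃ u ∈ Lu, ∃ t ∈ Lt, u = t
    · rw [if_pos (hInter.mpr hEx)]
      conv_rhs => rw [if_pos (Or.inr (hE.mpr hEx) :
        (0 : Int) = 100 ∨ ((Lu.flatMap (fun u => Lt.map (pvPairScore u))).any (fun x => x == 100) = true))]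
    · rw [if_neg (fun h => hEx (hInter.mp h))]
      have h100n : ¬((0 : Int) = 100 ∨ ((Lu.flatMap (fun u => Lt.map (pvPairScore u))).any (fun x => x == 100) = true)) := by
        rintro (h | h)
        · norm_num at h
        · exact hEx (hE.mp h)
      conv_rhs => rw [if_neg h100n]
      by_cases hPar : ∃ u ∈ Lu, ∃ t ∈ Lt, (PySem.Str.isIn u t || PySem.Str.isIn t u) = true
      · rw [if_pos (hP.mpr hPar)]
        have : ∃ u ∈ Lu, ∃ t ∈ Lt, pvPairScore u t = 80 := by
          rcases hPar with ⟨u, hu, t, ht, hsub⟩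
          exact ⟨u, hu, t, ht, (pvPairScore_eq_80 u t).mpr
            ⟨fun heq => hEx ⟨u, hu, t, ht, heq⟩, hsub⟩⟩
        conv_rhs => rw [if_pos (Or.inr (h80.mpr this) :
          (0 : Int) = 80 ∨ ((Lu.flatMap (fun u => Lt.map (pvPairScore u))).any (fun x => x == 80) = true))]
      · rw [if_neg (fun h => hPar (hP.mp h))]
        have h80n : ¬((0 : Int) = 80 ∨ ((Lu.flatMap (fun u => Lt.map (pvPairScore u))).any (fun x => x == 80) = true)) := by
          rintro (h | h)
          · norm_num at h
          · rcases h80.mp h with ⟨u, hu, t, ht, hx⟩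
            exact hPar ⟨u, hu, t, ht, ((pvPairScore_eq_80 u t).mp hx).2⟩
        conv_rhs => rw [if_neg h80n]
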